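-- pv_equiv track=rewrite | github.com/inegm/hbforty | hbforty.py | base40_to_pitch_name
-- ===== SOURCE A (Python) =====
-- def letter_to_base40(letter):
--     """Pitch letter name to Base40 pitch number conversion.
--
--     :param letter: Pitch letter
--     :type letter: str
--
--     :returns: Base40 pitch number
--     :rtype: int
--
--     **Examples**
--
--     >>> letter_to_base40('F')
--     20
--     """
--     letters = {'C': 3, 'D': 9, 'E': 15, 'F': 20, 'G': 26, 'A': 32, 'B': 38}
--     if letter not in letters.keys():
--         raise ValueError('invalid letter \'{}\''.format(letter))
--     return letters[letter]
--
-- def base40_to_pitch_name(base40):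
--     """Pitch string to Base40 pitch number.
--
--     :param base40: Base40 pitch number
--     :type base40: int
--
--     :returns: Pitch name
--     :rtype: str
--
--     **Examples**
--
--     >>> base40_to_pitch_name(242)
--     'Cb6'
--     """
--     if base40 < 1:
--         raise ValueError('note integers must be greater than 0')
--     octave, pitch = divmod(base40 - 1, 40)
--     pitch += 1
--     pitches = [None]
--     for pletter in ['C', 'D', 'E', 'F', 'G', 'A', 'B']:
--         pitches += [pletter] * 5 + [None]
--     del pitches[18]
--     letter = pitches[pitch]
--     if letter is None:
--         msg = '{} has no valid pitch representation'.format(base40)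
--         raise ValueError(msg)
--     note = letter_to_base40(letter)
--     acc = pitch - note
--     if acc > 0:
--         name = letter + '#' * acc + str(octave)
--     elif acc < 0:
--         name = letter + 'b' * abs(acc) + str(octave)
--     else:
--         name = letter + str(octave)
--     return name
-- ===== SOURCE B (Python) =====
-- def base40_to_pitch_name(base40):
--     if base40 < 1:
--         raise ValueError('note integers must be greater than 0')
--     octave, pitch = divmod(base40 - 1, 40)
--     pitch += 1
--     bases = {'C': 3, 'D': 9, 'E': 15, 'F': 20, 'G': 26, 'A': 32, 'B': 38}
--     for letter, base in bases.items():
--         if abs(pitch - base) <= 2: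
--             acc = pitch - base
--             return letter + '#' * acc + 'b' * (-acc) + str(octave)
--     raise ValueError('{} has no valid pitch representation'.format(base40))
-- ===== Notes on version B (the rewrite author's own statement) =====
-- stated objective: simpler
-- what changed: B drops A's padded None-separated 42-entry table and its index lookup plus the letter_to_base40 dict round-trip; instead it scans the 7 letter centers once and picks the letter whose center is within 2 of the pitch, deriving the accidental directly.
import Mathlib
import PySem

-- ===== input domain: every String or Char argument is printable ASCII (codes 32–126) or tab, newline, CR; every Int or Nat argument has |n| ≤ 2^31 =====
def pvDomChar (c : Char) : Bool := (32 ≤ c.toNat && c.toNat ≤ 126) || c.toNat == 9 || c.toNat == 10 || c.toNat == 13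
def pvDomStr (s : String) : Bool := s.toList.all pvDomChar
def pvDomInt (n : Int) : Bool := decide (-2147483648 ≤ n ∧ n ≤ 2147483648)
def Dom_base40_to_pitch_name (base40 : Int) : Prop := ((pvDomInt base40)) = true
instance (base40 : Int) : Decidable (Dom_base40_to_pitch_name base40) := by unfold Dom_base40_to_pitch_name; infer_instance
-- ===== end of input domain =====

-- B replaces A's padded None-separated table + letter_to_base40 dict lookup by a direct scan
-- of the 7 letter centers (objective: simpler). Return-value equivalence on Pre_ (where A returns).

-- ===== PORT A =====
-- helper of A: dict lookup, none = ValueError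
def letter_to_base40 (letter : String) : Option Int :=
  let letters : PySem.Dict String Int :=
    PySem.Dict.ofList [("C", 3), ("D", 9), ("E", 15), ("F", 20), ("G", 26), ("A", 32), ("B", 38)]
  letters.get? letter

def base40_to_pitch_name (base40 : Int) : String :=
  if base40 < 1 then ""  -- raise ValueError (outside Pre_)
  else
    let octave := PySem.Int.floordiv (base40 - 1) 40
    let pitch := PySem.Int.mod (base40 - 1) 40 + 1
    let pitches : List (Option String) :=
      ["C", "D", "E", "F", "G", "A", "B"].foldl
        (fun acc pletter => acc ++ (List.replicate 5 (some pletter) ++ [none]))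
        [(none : Option String)]
    let pitches := pitches.eraseIdx 18  -- del pitches[18] (positive in-range index)
    match PySem.List.pyGet? pitches pitch with
    | none => ""          -- IndexError: unreachable (1 ≤ pitch ≤ 40 < 42)
    | some none => ""     -- raise ValueError 'no valid pitch representation' (outside Pre_)
    | some (some letter) =>
      match letter_to_base40 letter with
      | none => ""        -- raise ValueError in letter_to_base40: unreachable
      | some note =>
        let acc := pitch - note
        if acc > 0 then letter ++ String.ofList (List.replicate acc.toNat '#') ++ PySem.Int.toStr octave
        else if acc < 0 then letter ++ String.ofList (List.replicate (-acc).toNat 'b') ++ PySem.Int.toStr octave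
        else letter ++ PySem.Int.toStr octave

-- ===== PORT B =====
def base40_to_pitch_name_alt (base40 : Int) : String :=
  if base40 < 1 then ""  -- raise ValueError (outside Pre_)
  else
    let octave := PySem.Int.floordiv (base40 - 1) 40
    let pitch := PySem.Int.mod (base40 - 1) 40 + 1
    let bases : List (String × Int) := [("C", 3), ("D", 9), ("E", 15), ("F", 20), ("G", 26), ("A", 32), ("B", 38)]
    match bases.find? (fun lb => decide ((pitch - lb.2).natAbs ≤ 2)) with
    | some (letter, base) =>
      let acc := pitch - base
      letter ++ String.ofList (List.replicate acc.toNat '#')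
             ++ String.ofList (List.replicate (-acc).toNat 'b') ++ PySem.Int.toStr octave
    | none => ""          -- raise ValueError 'no valid pitch representation' (outside Pre_)

-- ===== PRECONDITION & SPEC =====
-- Pre_ excludes exactly the inputs where A raises: base40 < 1, and the five pitch-class slots
-- per octave (pitch 6, 12, 23, 29, 35) that have no letter representation.
def Pre_base40_to_pitch_name (base40 : Int) : Prop :=
  1 ≤ base40 ∧ (PySem.Int.mod (base40 - 1) 40 + 1) ∉ ([6, 12, 23, 29, 35] : List Int)
instance (base40 : Int) : Decidable (Pre_base40_to_pitch_name base40) := by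
  unfold Pre_base40_to_pitch_name; infer_instance

def pvWitness_base40_to_pitch_name : Int := (242)

def Spec_base40_to_pitch_name (base40 : Int) (out : String) : Prop := out = base40_to_pitch_name_alt base40
instance (base40 : Int) (out : String) : Decidable (Spec_base40_to_pitch_name base40 out) := by unfold Spec_base40_to_pitch_name; infer_instance

-- ===== CLAIM (what is proved, stated in full; the proofs are below) =====
def Claim_equal_base40_to_pitch_name : Prop := ∀ (base40 : Int), Dom_base40_to_pitch_name base40 → Pre_base40_to_pitch_name base40 → Spec_base40_to_pitch_name base40 (base40_to_pitch_name base40)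

-- ===== LEMMAS AND PROOFS =====
theorem key_lemma (o r : Int) (h0 : 0 ≤ r) (h40 : r < 40)
    (hne : (r + 1) ∉ ([6, 12, 23, 29, 35] : List Int)) :
    (match PySem.List.pyGet?
        ((["C", "D", "E", "F", "G", "A", "B"].foldl
          (fun acc pletter => acc ++ (List.replicate 5 (some pletter) ++ [none]))
          [(none : Option String)]).eraseIdx 18) (r + 1) with
    | none => ""
    | some none => ""
    | some (some letter) =>
      match letter_to_base40 letter with
      | none => ""
      | some note =>
        let acc := r + 1 - note
        if acc > 0 then letter ++ String.ofList (List.replicate acc.toNat '#') ++ PySem.Int.toStr o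
        else if acc < 0 then letter ++ String.ofList (List.replicate (-acc).toNat 'b') ++ PySem.Int.toStr o
        else letter ++ PySem.Int.toStr o) =
    (match ([("C", 3), ("D", 9), ("E", 15), ("F", 20), ("G", 26), ("A", 32), ("B", 38)] : List (String × Int)).find?
        (fun lb => decide (((r + 1) - lb.2).natAbs ≤ 2)) with
    | some (letter, base) =>
      let acc := r + 1 - base
      letter ++ String.ofList (List.replicate acc.toNat '#')
             ++ String.ofList (List.replicate (-acc).toNat 'b') ++ PySem.Int.toStr o
    | none => "") := by
  interval_cases r <;> simp_all <;> rfl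

-- ===== VERDICT (by name: the statement is the Claim_ definition above) =====
theorem base40_to_pitch_name_spec : Claim_equal_base40_to_pitch_name := by
  intro base40 _ hpre
  obtain ⟨h1, hne⟩ := hpre
  unfold Spec_base40_to_pitch_name base40_to_pitch_name base40_to_pitch_name_alt
  rw [if_neg (by omega), if_neg (by omega)]
  have h0 : 0 ≤ PySem.Int.mod (base40 - 1) 40 := PySem.Int.mod_nonneg _ (by norm_num)
  have h40 : PySem.Int.mod (base40 - 1) 40 < 40 := PySem.Int.mod_lt _ (by norm_num)
  exact key_lemma _ _ h0 h40 hne
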